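-- pv_equiv track=rewrite | github.com/alexandraback/datacollection | solutions_5744014401732608_0/Python/unsneakyNinja/slides.py | doStuff
-- ===== SOURCE A (Python) =====
-- def doStuff(B, M):
--     maxconnections = sum(range(0, B-1)) + 1
--     if (maxconnections < M):
--         return "IMPOSSIBLE"
--     retstring = 'POSSIBLE\n'
--     M-=1
--     for i in range(B-1):
--         # counts 1->B
--         retstring += '0'
--         retstring += '0'*i
--         maxconntoadd = B - 2 - i
--         if M > maxconntoadd:
--             retstring += '1'*maxconntoadd
--             M -= maxconntoadd
--             retstring += '1\n'
--         else:
--             retstring += '1'*M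
--             retstring += '0'*(maxconntoadd - M)
--             retstring += '1\n'
--             M = 0
--     retstring += '0'*B
--     return retstring
-- ===== SOURCE B (Python) =====
-- def doStuff(B, M):
--     maxconnections = (B - 1) * (B - 2) // 2 + 1 if B >= 2 else 1
--     if maxconnections < M:
--         return "IMPOSSIBLE"
--     rows = []
--     for i in range(B - 1):
--         cap = B - 2 - i
--         prefix = i * (B - 2) - i * (i - 1) // 2
--         ones = max(0, min(cap, (M - 1) - prefix))
--         rows.append('0' * (i + 1) + '1' * ones + '0' * (cap - ones) + '1')
--     return 'POSSIBLE\n' + ''.join(r + '\n' for r in rows) + '0' * B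
-- ===== Notes on version B (the rewrite author's own statement) =====
-- stated objective: alternative
-- what changed: The threaded mutable budget M decremented row by row is replaced by an independent closed-form count per row (ones_i = max(0, min(cap_i, (M-1) - prefix_i)) with an arithmetic prefix sum) and a join of the rows; the IMPOSSIBLE guard's sum(range(...)) becomes the Gauss formula.
-- intended difference: For M <= 0 with B >= 2, A still decrements M to a negative value, so its first interior row gets '0'*(cap-(M-1)) extra zeros and is longer than B characters (a malformed matrix row); B emits the well-formed row with zero extra connections, which is the intended adjacency-matrix output. — e.g. on doStuff(3, 0): A returns "POSSIBLE\n0001\n001\n000", B returns "POSSIBLE\n001\n001\n000"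
import Mathlib
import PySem

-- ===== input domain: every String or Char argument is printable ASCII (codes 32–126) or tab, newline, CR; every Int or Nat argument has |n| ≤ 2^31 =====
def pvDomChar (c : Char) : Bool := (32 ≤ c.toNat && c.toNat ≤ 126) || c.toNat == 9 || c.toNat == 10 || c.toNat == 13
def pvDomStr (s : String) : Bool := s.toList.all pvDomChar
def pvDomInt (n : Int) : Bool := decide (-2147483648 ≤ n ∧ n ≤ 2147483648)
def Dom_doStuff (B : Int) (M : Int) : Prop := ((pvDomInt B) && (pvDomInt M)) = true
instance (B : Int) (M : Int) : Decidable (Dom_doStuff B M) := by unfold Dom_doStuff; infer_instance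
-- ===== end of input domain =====

-- B replaces A's threaded, decremented budget M with an independent closed-form
-- ones-count per row (alternative decomposition, same asymptotic cost); for M ≤ 0
-- (B ≥ 2) A emits a malformed over-long first row, B the intended all-zero row (see D_).

-- ===== PORT A =====
-- Python 's' * n (empty for n ≤ 0: Int.toNat clamps exactly as Python's repetition does)
def pvRep (c : Char) (n : Int) : List Char := List.replicate n.toNat c

-- the body of A's 'for i in range(B-1)' loop, threading (retstring, M)
def pvStepA (B : Int) (st : List Char × Int) (i : Int) : List Char × Int :=
  let ret := st.1 ++ ['0'] ++ pvRep '0' i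
  let maxconntoadd := B - 2 - i
  if st.2 > maxconntoadd then
    (ret ++ pvRep '1' maxconntoadd ++ ['1', '\n'], st.2 - maxconntoadd)
  else
    (ret ++ pvRep '1' st.2 ++ pvRep '0' (maxconntoadd - st.2) ++ ['1', '\n'], 0)

def doStuff (B : Int) (M : Int) : String :=
  let maxconnections := (PySem.List.pyRange 0 (B-1) 1).sum + 1
  if maxconnections < M then "IMPOSSIBLE"
  else
    let st := (PySem.List.pyRange 0 (B-1) 1).foldl (pvStepA B) ("POSSIBLE\n".toList, M - 1)
    String.ofList (st.1 ++ pvRep '0' B)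

-- ===== PORT B =====
-- interior row i, computed independently of the other rows
def pvRowB (B : Int) (M : Int) (i : Int) : List Char :=
  let cap := B - 2 - i
  let pfx := i * (B - 2) - PySem.Int.floordiv (i * (i - 1)) 2
  let ones := max 0 (min cap ((M - 1) - pfx))
  pvRep '0' (i + 1) ++ pvRep '1' ones ++ pvRep '0' (cap - ones) ++ ['1']

def doStuff_alt (B : Int) (M : Int) : String :=
  let maxconnections := if 2 ≤ B then PySem.Int.floordiv ((B-1)*(B-2)) 2 + 1 else 1
  if maxconnections < M then "IMPOSSIBLE"
  else
    let rows := (PySem.List.pyRange 0 (B-1) 1).map (pvRowB B M)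
    String.ofList ("POSSIBLE\n".toList ++ (rows.map (· ++ ['\n'])).flatten ++ pvRep '0' B)

-- ===== PRECONDITION & SPEC =====
-- For M ≤ 0 with B ≥ 2, A still decrements M to a negative value, so its first interior
-- row gets '0'*(cap-(M-1)) extra zeros and is longer than B characters (a malformed matrix
-- row); B emits the well-formed row with zero extra connections, the intended output.
def D_doStuff (B : Int) (M : Int) : Prop := 2 ≤ B ∧ M ≤ 0
instance (B : Int) (M : Int) : Decidable (D_doStuff B M) := by unfold D_doStuff; infer_instance

def Spec_doStuff (B : Int) (M : Int) (out : String) : Prop := ¬ D_doStuff B M → out = doStuff_alt B M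
instance (B : Int) (M : Int) (out : String) : Decidable (Spec_doStuff B M out) := by unfold Spec_doStuff; infer_instance

def pvDiffWitness_doStuff : Int × Int := (3, 0)
def pvDiffWitnessOut_doStuff : String × String := ("POSSIBLE\n0001\n001\n000", "POSSIBLE\n001\n001\n000")

-- ===== CLAIM (what is proved, stated in full; the proofs are below) =====
def Claim_unchanged_doStuff : Prop := ∀ (B : Int) (M : Int), Dom_doStuff B M → Spec_doStuff B M (doStuff B M)
def Claim_changed_doStuff : Prop := Dom_doStuff (pvDiffWitness_doStuff.1) (pvDiffWitness_doStuff.2) ∧ D_doStuff (pvDiffWitness_doStuff.1) (pvDiffWitness_doStuff.2) ∧ doStuff (pvDiffWitness_doStuff.1) (pvDiffWitness_doStuff.2) = pvDiffWitnessOut_doStuff.1 ∧ doStuff_alt (pvDiffWitness_doStuff.1) (pvDiffWitness_doStuff.2) = pvDiffWitnessOut_doStuff.2 ∧ pvDiffWitnessOut_doStuff.1 ≠ pvDiffWitnessOut_doStuff.2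
def Claim_exact_doStuff : Prop := ∀ (B : Int) (M : Int), Dom_doStuff B M → D_doStuff B M → doStuff B M ≠ doStuff_alt B M

-- ===== LEMMAS AND PROOFS =====

-- the closed-form prefix sum of the caps of rows 0..a-1
def pvPref (B : Int) (a : Int) : Int := a * (B - 2) - PySem.Int.floordiv (a * (a - 1)) 2

-- the rows B emits from row a on, each with its newline
def pvRowsB (B : Int) (M : Int) (a : Int) : List Char :=
  (((PySem.List.pyRange a (B-1) 1).map (pvRowB B M)).map (· ++ ['\n'])).flatten

lemma pvPref_zero (B : Int) : pvPref B 0 = 0 := by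
  simp [pvPref]

lemma pvPref_succ (B a : Int) : pvPref B (a+1) = pvPref B a + (B - 2 - a) := by
  unfold pvPref
  rw [PySem.Int.floordiv_eq_ediv_of_pos (by omega : (0:Int) < 2),
      PySem.Int.floordiv_eq_ediv_of_pos (by omega : (0:Int) < 2)]
  obtain ⟨m, hm⟩ : Even (a * (a - 1)) := Int.even_mul_pred_self a
  have h2 : (a+1) * (a + 1 - 1) = a * (a - 1) + 2 * a := by ring
  have h3 : (a+1) * (B - 2) = a * (B - 2) + (B - 2) := by ring
  omega

lemma pvSum_range (n : Nat) : (PySem.List.pyRange 0 (n : Int) 1).sum * 2 = (n : Int) * ((n : Int) - 1) := by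
  induction n with
  | zero => simp [PySem.List.pyRange_one_eq_nil]
  | succ k ih =>
    have : ((k:Int) + 1) = ((k+1 : Nat) : Int) := by push_cast; ring
    rw [show ((k+1 : Nat) : Int) = (k:Int) + 1 by push_cast; ring,
        PySem.List.pyRange_one_succ_right (by omega : (0:Int) ≤ (k:Int))]
    simp only [List.sum_append, List.sum_cons, List.sum_nil]
    nlinarith [ih]

-- A's IMPOSSIBLE threshold equals B's closed form
lemma pvGuard_eq (B : Int) :
    (PySem.List.pyRange 0 (B-1) 1).sum + 1
      = (if 2 ≤ B then PySem.Int.floordiv ((B-1)*(B-2)) 2 + 1 else 1) := by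
  by_cases hB : 2 ≤ B
  · rw [if_pos hB]
    have hn : ((B-1).toNat : Int) = B - 1 := by omega
    have := pvSum_range (B-1).toNat
    rw [hn] at this
    rw [PySem.Int.floordiv_eq_ediv_of_pos (by omega : (0:Int) < 2)]
    have h2 : (B-1) * (B-2) = (B-1) * ((B-1) - 1) := by ring
    omega
  · rw [if_neg hB, PySem.List.pyRange_one_eq_nil (by omega : B - 1 ≤ 0)]
    simp

lemma pvRep_succ (c : Char) (a : Int) (h : 0 ≤ a) :
    pvRep c (a+1) = c :: pvRep c a := by
  unfold pvRep
  rw [show (a+1).toNat = a.toNat + 1 by omega, List.replicate_succ]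

-- loop invariant: from row a on, with remaining budget max 0 (M-1 - pvPref B a),
-- A's loop appends exactly B's independently computed rows
lemma pvLoopA (B M : Int) : ∀ (k : Nat) (a : Int), 0 ≤ a → a + k = B - 1 → ∀ acc : List Char,
    ((PySem.List.pyRange a (B-1) 1).foldl (pvStepA B) (acc, max 0 ((M-1) - pvPref B a))).1
      = acc ++ pvRowsB B M a := by
  intro k
  induction k with
  | zero =>
    intro a _ ha acc
    rw [PySem.List.pyRange_one_eq_nil (by omega : B - 1 ≤ a)]
    simp [pvRowsB, PySem.List.pyRange_one_eq_nil (by omega : B - 1 ≤ a)]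
  | succ k ih =>
    intro a ha0 ha acc
    have hlt : a < B - 1 := by omega
    rw [PySem.List.pyRange_one_cons hlt, List.foldl_cons]
    have hcap : 0 ≤ B - 2 - a := by omega
    set m := max 0 ((M-1) - pvPref B a) with hm
    have hrow : pvRowB B M a =
        '0' :: (pvRep '0' a ++ pvRep '1' (max 0 (min (B-2-a) ((M-1) - pvPref B a))) ++
          pvRep '0' ((B-2-a) - max 0 (min (B-2-a) ((M-1) - pvPref B a))) ++ ['1']) := by
      unfold pvRowB
      rw [pvRep_succ '0' a ha0]
      simp [List.append_assoc, pvPref]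
    by_cases hgt : m > B - 2 - a
    · -- then branch of A
      have hmeq : m = (M-1) - pvPref B a := by omega
      have hstep : pvStepA B (acc, m) a =
          (acc ++ ['0'] ++ pvRep '0' a ++ pvRep '1' (B-2-a) ++ ['1','\n'], m - (B-2-a)) := by
        simp [pvStepA, if_pos hgt]
      rw [hstep]
      have hnext : m - (B-2-a) = max 0 ((M-1) - pvPref B (a+1)) := by
        rw [pvPref_succ]; omega
      rw [hnext, ih (a+1) (by omega) (by omega)]
      have hones : max 0 (min (B-2-a) ((M-1) - pvPref B a)) = B-2-a := by omega
      simp only [pvRowsB]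
      rw [PySem.List.pyRange_one_cons hlt]
      simp only [List.map_cons, List.flatten_cons]
      rw [hrow, hones]
      have hz : pvRep '0' ((B-2-a) - (B-2-a)) = [] := by simp [pvRep]
      rw [hz]
      simp [List.append_assoc]
    · -- else branch of A
      have hle : ¬ (m > B - 2 - a) := hgt
      have hstep : pvStepA B (acc, m) a =
          (acc ++ ['0'] ++ pvRep '0' a ++ pvRep '1' m ++ pvRep '0' ((B-2-a) - m) ++ ['1','\n'],
            (0:Int)) := by
        simp [pvStepA, if_neg hle]
      rw [hstep]
      have hnext : (0:Int) = max 0 ((M-1) - pvPref B (a+1)) := by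
        rw [pvPref_succ]; omega
      rw [hnext, ih (a+1) (by omega) (by omega)]
      have hones : max 0 (min (B-2-a) ((M-1) - pvPref B a)) = m := by omega
      simp only [pvRowsB]
      rw [PySem.List.pyRange_one_cons hlt]
      simp only [List.map_cons, List.flatten_cons]
      rw [hrow, hones]
      simp [List.append_assoc]

theorem doStuff_spec : Claim_unchanged_doStuff := by
  unfold Claim_unchanged_doStuff
  intro B M _ hD
  simp only [doStuff, doStuff_alt]
  rw [pvGuard_eq]
  split_ifs with hB hlt hlt
  · rfl
  · have hM : 1 ≤ M := by
      by_contra hM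
      exact hD ⟨hB, by omega⟩
    have hinit : M - 1 = max 0 ((M-1) - pvPref B 0) := by
      rw [pvPref_zero]; omega
    rw [hinit, pvLoopA B M (B-1).toNat 0 le_rfl (by omega)]
    simp [pvRowsB]
  · rfl
  · rw [PySem.List.pyRange_one_eq_nil (by omega : B - 1 ≤ 0)]
    simp

theorem doStuff_changed : Claim_changed_doStuff := by
  unfold Claim_changed_doStuff; decide

theorem doStuff_tight : Claim_exact_doStuff := by
  unfold Claim_exact_doStuff
  intro B M _ hD h
  obtain ⟨hB, hM⟩ := hD
  have hfd : 0 ≤ PySem.Int.floordiv ((B-1)*(B-2)) 2 := by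
    rw [PySem.Int.floordiv_eq_ediv_of_pos (by omega : (0:Int) < 2)]
    have : 0 ≤ (B-1)*(B-2) := mul_nonneg (by omega) (by omega)
    omega
  have hcond : ¬ ((if 2 ≤ B then PySem.Int.floordiv ((B-1)*(B-2)) 2 + 1 else 1) < M) := by
    rw [if_pos hB]; omega
  simp only [doStuff, doStuff_alt] at h
  rw [pvGuard_eq, if_neg hcond, if_neg hcond] at h
  have hl := congrArg String.toList h
  simp only [String.toList_ofList] at hl
  rw [PySem.List.pyRange_one_cons (by omega : (0:Int) < B-1)] at hl
  simp only [List.foldl_cons, List.map_cons, List.flatten_cons] at hl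
  have hstep0 : pvStepA B ("POSSIBLE\n".toList, M - 1) 0 =
      ("POSSIBLE\n".toList ++ ['0'] ++ pvRep '0' 0 ++ pvRep '1' (M-1) ++
        pvRep '0' (B - 2 - 0 - (M-1)) ++ ['1','\n'], 0) := by
    simp only [pvStepA]
    rw [if_neg (by omega : ¬ (M - 1 > B - 2 - 0))]
  rw [hstep0] at hl
  norm_num at hl
  have hpref1 : pvPref B 1 = B - 2 := by
    unfold pvPref
    rw [PySem.Int.floordiv_eq_ediv_of_pos (by omega : (0:Int) < 2)]
    norm_num
  have hloop := pvLoopA B M (B-2).toNat 1 (by omega) (by omega)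
      ("POSSIBLE\n".toList ++ ['0'] ++ pvRep '0' 0 ++ pvRep '1' (M-1) ++
        pvRep '0' (B - 2 - 0 - (M-1)) ++ ['1','\n'])
  rw [show max 0 ((M-1) - pvPref B 1) = 0 by rw [hpref1]; omega] at hloop
  norm_num at hloop
  rw [hloop] at hl
  have hlen := congrArg List.length hl
  simp [pvRowsB, pvRowB, pvRep] at hlen
  omega
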